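-- pv_equiv track=rewrite | github.com/realFincho/Competitive-pyprogramming | strings/z-function.py | z_function_gray_string
-- ===== SOURCE A (Python) =====
-- def z_function_gray_string(j):
--     '''
--     :param j: position of element in gray string
--     :return: z-function value in j-pos
--     '''
--     if j & 1 or j == 0:
--         return 0
--     c = 0
--     while j % 2 == 0:
--         c += 1
--         j //= 2
--     return 2 ** c - 1
-- ===== SOURCE B (Python) =====
-- def z_function_gray_string(j):
--     '''
--     :param j: position of element in gray string
--     :return: z-function value in j-pos
--     '''
--     if j & 1 or j == 0:
--         return 0
--     return (j & -j) - 1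
-- ===== Notes on version B (the rewrite author's own statement) =====
-- stated objective: simpler
-- what changed: The trailing-zero counting while-loop and the subsequent power computation are replaced by a single closed-form bit expression that isolates the lowest set bit, so B is loop-free.
import Mathlib
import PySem

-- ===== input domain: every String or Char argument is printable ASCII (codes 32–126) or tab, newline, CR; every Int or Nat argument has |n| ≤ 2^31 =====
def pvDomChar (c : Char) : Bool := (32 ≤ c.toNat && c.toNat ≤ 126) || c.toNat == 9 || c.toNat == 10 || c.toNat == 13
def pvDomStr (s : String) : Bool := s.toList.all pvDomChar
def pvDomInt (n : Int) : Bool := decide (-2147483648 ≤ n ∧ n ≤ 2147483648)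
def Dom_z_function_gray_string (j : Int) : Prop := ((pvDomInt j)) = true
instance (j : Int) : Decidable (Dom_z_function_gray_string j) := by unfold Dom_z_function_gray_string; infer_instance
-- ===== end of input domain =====

-- B replaces A's trailing-zero counting loop and 2**c-1 by the closed form (j & -j) - 1 (simpler, loop-free).

-- ===== PORT A =====
-- The while loop 'while j % 2 == 0: c += 1; j //= 2'; the 'j ≠ 0' conjunct is only a
-- totality guard (the loop is only entered with j ≠ 0, where it never reaches 0).
def zLoopA (c : Nat) (j : Int) : Int :=
  if _h : PySem.Int.mod j 2 = 0 ∧ j ≠ 0 then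
    zLoopA (c + 1) (PySem.Int.floordiv j 2)
  else
    2 ^ c - 1
termination_by j.natAbs
decreasing_by
  obtain ⟨k, hk⟩ := (PySem.Int.mod_eq_zero_iff_dvd j 2).mp _h.1
  have h2 : PySem.Int.floordiv j 2 = k := by
    simp [PySem.Int.floordiv, hk, Int.mul_fdiv_cancel_left _ (by norm_num : (2:Int) ≠ 0)]
  rw [h2]
  have hk0 : k ≠ 0 := by rintro rfl; exact _h.2 (by simpa using hk)
  have : j.natAbs = 2 * k.natAbs := by rw [hk]; simp [Int.natAbs_mul]
  omega

def z_function_gray_string (j : Int) : Int :=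
  if PySem.Int.band j 1 ≠ 0 ∨ j = 0 then 0
  else zLoopA 0 j

-- ===== PORT B =====
def z_function_gray_string_alt (j : Int) : Int :=
  if PySem.Int.band j 1 ≠ 0 ∨ j = 0 then 0
  else PySem.Int.band j (-j) - 1

-- ===== PRECONDITION & SPEC =====
def Spec_z_function_gray_string (j : Int) (out : Int) : Prop := out = z_function_gray_string_alt j
instance (j : Int) (out : Int) : Decidable (Spec_z_function_gray_string j out) := by unfold Spec_z_function_gray_string; infer_instance

-- ===== CLAIM (what is proved, stated in full; the proofs are below) =====
def Claim_equal_z_function_gray_string : Prop := ∀ (j : Int), Dom_z_function_gray_string j → Spec_z_function_gray_string j (z_function_gray_string j)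

-- ===== LEMMAS AND PROOFS =====

-- lowest set bit of a natural number, as n - (n &&& (n-1))
def lowbitN (n : Nat) : Nat := n - (n &&& (n - 1))

theorem and_pred_odd (m : Nat) : (2*m+1) &&& (2*m) = 2*m := by
  apply Nat.eq_of_testBit_eq
  intro i
  rw [Nat.testBit_and]
  cases i with
  | zero => simp [Nat.testBit_zero]
  | succ n =>
      simp only [Nat.testBit_add_one]
      have h1 : (2*m+1)/2 = m := by omega
      have h2 : (2*m)/2 = m := by omega
      rw [h1, h2, Bool.and_self]

theorem and_pred_even (k : Nat) : (2*k) &&& (2*k-1) = 2*(k &&& (k-1)) := by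
  apply Nat.eq_of_testBit_eq
  intro i
  rw [Nat.testBit_and]
  cases i with
  | zero => simp [Nat.testBit_zero]
  | succ n =>
      simp only [Nat.testBit_add_one]
      have h1 : (2*k)/2 = k := by omega
      have h2 : (2*k-1)/2 = k-1 := by omega
      have h3 : (2*(k &&& (k-1)))/2 = k &&& (k-1) := by omega
      rw [h1, h2, h3, Nat.testBit_and]

theorem lowbitN_odd (n : Nat) (h : n % 2 = 1) : lowbitN n = 1 := by
  obtain ⟨m, rfl⟩ : ∃ m, n = 2*m+1 := ⟨n/2, by omega⟩
  unfold lowbitN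
  have : 2*m+1-1 = 2*m := by omega
  rw [this, and_pred_odd]
  omega

theorem lowbitN_even (k : Nat) : lowbitN (2*k) = 2 * lowbitN k := by
  unfold lowbitN
  rw [and_pred_even]
  have h1 : k &&& (k-1) ≤ k := Nat.and_le_left
  omega

-- band j (-j) computed through lowbitN of |j|
theorem band_neg_self (j : Int) (hj : j ≠ 0) :
    PySem.Int.band j (-j) = (lowbitN j.natAbs : Int) := by
  unfold PySem.Int.band lowbitN
  rcases lt_trichotomy j 0 with hlt | heq | hgt
  · have h1 : ¬ (0 ≤ j) := by omega
    have h2 : (0:Int) ≤ -j := by omega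
    simp only [h1, h2, if_true, if_false]
    congr 1
    have ha : (-j).toNat = j.natAbs := by omega
    have hb : (-j - 1).toNat = j.natAbs - 1 := by omega
    rw [ha, hb]
  · exact absurd heq hj
  · have h1 : (0:Int) ≤ j := by omega
    have h2 : ¬ ((0:Int) ≤ -j) := by omega
    simp only [h1, h2, if_true, if_false]
    congr 1
    have ha : j.toNat = j.natAbs := by omega
    have hb : (-(-j) - 1).toNat = j.natAbs - 1 := by omega
    rw [ha, hb]

-- the loop computes 2^c * lowbit |j| - 1
theorem zLoopA_eq (n : Nat) : ∀ (j : Int), j ≠ 0 → j.natAbs ≤ n →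
    ∀ (c : Nat), zLoopA c j = 2 ^ c * (lowbitN j.natAbs : Int) - 1 := by
  induction n with
  | zero => intro j hj hn; omega
  | succ n ih =>
      intro j hj hn c
      rw [zLoopA]
      by_cases hev : PySem.Int.mod j 2 = 0
      · obtain ⟨k, hk⟩ := (PySem.Int.mod_eq_zero_iff_dvd j 2).mp hev
        have hfd : PySem.Int.floordiv j 2 = k := by
          simp [PySem.Int.floordiv, hk, Int.mul_fdiv_cancel_left _ (by norm_num : (2:Int) ≠ 0)]
        have hk0 : k ≠ 0 := by rintro rfl; exact hj (by simpa using hk)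
        have habs : j.natAbs = 2 * k.natAbs := by rw [hk]; simp [Int.natAbs_mul]
        rw [dif_pos ⟨hev, hj⟩, hfd, ih k hk0 (by omega) (c+1), habs, lowbitN_even]
        push_cast
        ring
      · have hodd : j.natAbs % 2 = 1 := by
          have : ¬ (2 ∣ j) := fun hd => hev ((PySem.Int.mod_eq_zero_iff_dvd j 2).mpr hd)
          omega
        rw [dif_neg (by tauto), lowbitN_odd _ hodd]
        push_cast
        ring

-- ===== VERDICT (by name: the statement is the Claim_ definition above) =====
theorem z_function_gray_string_spec : Claim_equal_z_function_gray_string := by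
  intro j _
  unfold Spec_z_function_gray_string z_function_gray_string z_function_gray_string_alt
  by_cases h : PySem.Int.band j 1 ≠ 0 ∨ j = 0
  · rw [if_pos h, if_pos h]
  · rw [if_neg h, if_neg h]
    push Not at h
    rw [zLoopA_eq j.natAbs j h.2 le_rfl 0, band_neg_self j h.2]
    ring
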